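-- pv_equiv track=rewrite | github.com/kamazoun/algorithms | python/codejam22/punched_cards.py | s
-- ===== SOURCE A (Python) =====
-- def s(r: int, c: int)->list:
--     # edge case non existant due to constraints
--     result = []
--     for i in range(2*r + 1):
--         line = []
--         for j in range(2*c + 1):
--             if i < 2 and j < 2:
--                 line.append('.')
--                 continue
--             if i % 2 == 0: #is_plus_line:
--                 if j  % 2 == 0: line.append('+')
--                 else: line.append('-')
--             else:
--                 if j % 2 == 0: line.append('|')
--                 else: line.append('.')
--         v = ''.join(i for i in line)
--         result.append(v)
--     return result
-- ===== SOURCE B (Python) =====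
-- def s(r: int, c: int) -> list:
--     # Each row is a canonical period-2 pattern truncated to the grid width;
--     # the first two rows get their leading 2 characters patched to dots.
--     w = 2 * c + 1
--
--     def row(i):
--         base = ('+-' * (c + 1))[:w] if i % 2 == 0 else ('|.' * (c + 1))[:w]
--         if i < 2:
--             return '.' * min(2, len(base)) + base[2:]
--         return base
--
--     return [row(i) for i in range(2 * r + 1)]
-- ===== Notes on version B (the rewrite author's own statement) =====
-- stated objective: faster
-- what changed: B builds each row once as a canonical period-2 pattern string ('+-'*(c+1) or '|.'*(c+1)) truncated to the grid width with the top-left 2x2 patched to dots, replacing A's per-cell inner loop and per-character join.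
import Mathlib
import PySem

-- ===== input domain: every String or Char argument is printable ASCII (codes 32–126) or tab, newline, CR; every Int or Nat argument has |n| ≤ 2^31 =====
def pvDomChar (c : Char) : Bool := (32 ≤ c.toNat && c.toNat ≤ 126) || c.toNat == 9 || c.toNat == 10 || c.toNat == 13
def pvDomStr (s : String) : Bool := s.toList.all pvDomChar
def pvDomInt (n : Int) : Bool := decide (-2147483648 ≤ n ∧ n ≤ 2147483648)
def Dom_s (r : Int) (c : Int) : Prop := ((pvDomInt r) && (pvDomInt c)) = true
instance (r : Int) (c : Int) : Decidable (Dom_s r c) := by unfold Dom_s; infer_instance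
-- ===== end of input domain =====

-- B builds each row once as a period-2 pattern string truncated to the grid width
-- (top-left 2x2 patched to dots) instead of A's per-cell inner loop; measured faster.

-- ===== PORT A =====
def s (r : Int) (c : Int) : List String :=
  (PySem.List.pyRange 0 (2*r + 1) 1).foldl
    (fun result i =>
      let line : List String :=
        (PySem.List.pyRange 0 (2*c + 1) 1).foldl
          (fun line j =>
            if i < 2 ∧ j < 2 then line ++ ["."]
            else if PySem.Int.mod i 2 = 0 then
              (if PySem.Int.mod j 2 = 0 then line ++ ["+"] else line ++ ["-"])
            else
              (if PySem.Int.mod j 2 = 0 then line ++ ["|"] else line ++ ["."])) []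
      let v := PySem.Str.join "" line
      result ++ [v]) []

-- ===== PORT B =====
-- helper 'row' of Source B
def sAltRow (c : Int) (i : Int) : List Char :=
  let base :=
    if PySem.Int.mod i 2 = 0 then
      PySem.List.slice (PySem.List.pyRepeat ['+', '-'] (c + 1)) none (some (2*c + 1))
    else
      PySem.List.slice (PySem.List.pyRepeat ['|', '.'] (c + 1)) none (some (2*c + 1))
  if i < 2 then List.replicate (min 2 base.length) '.' ++ PySem.List.slice base (some 2) none
  else base

def s_alt (r : Int) (c : Int) : List String :=
  (PySem.List.pyRange 0 (2*r + 1) 1).map (fun i => String.ofList (sAltRow c i))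

-- ===== PRECONDITION & SPEC =====
def Spec_s (r : Int) (c : Int) (out : List String) : Prop := out = s_alt r c
instance (r : Int) (c : Int) (out : List String) : Decidable (Spec_s r c out) := by unfold Spec_s; infer_instance

-- ===== CLAIM (what is proved, stated in full; the proofs are below) =====
def Claim_equal_s : Prop := ∀ (r : Int) (c : Int), Dom_s r c → Spec_s r c (s r c)

-- ===== LEMMAS AND PROOFS =====

-- A's cell as a single character / single-character string
def chCell (i j : Int) : Char :=
  if i < 2 ∧ j < 2 then '.'
  else if PySem.Int.mod i 2 = 0 then (if PySem.Int.mod j 2 = 0 then '+' else '-')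
  else (if PySem.Int.mod j 2 = 0 then '|' else '.')

def sCell (i j : Int) : String :=
  if i < 2 ∧ j < 2 then "."
  else if PySem.Int.mod i 2 = 0 then (if PySem.Int.mod j 2 = 0 then "+" else "-")
  else (if PySem.Int.mod j 2 = 0 then "|" else ".")

lemma sCell_toList (i j : Int) : (sCell i j).toList = [chCell i j] := by
  unfold sCell chCell; split_ifs <;> rfl

-- the canonical even ('+ - + …') and odd ('| . | …') row patterns
def P (n : Nat) : List Char := '+' :: (List.replicate n ['-', '+']).flatten
def Q (n : Nat) : List Char := '|' :: (List.replicate n ['.', '|']).flatten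

lemma foldl_app {α β : Type} (f : α → β) (l : List α) (init : List β) :
    l.foldl (fun acc x => acc ++ [f x]) init = init ++ l.map f := by
  induction l generalizing init with
  | nil => simp
  | cons a t ih => simp [List.foldl_cons, ih]

lemma modtwo (j : Int) : PySem.Int.mod j 2 = j % 2 :=
  PySem.Int.mod_eq_emod_of_pos (by omega)

lemma length_P (n : Nat) : (P n).length = 2*n + 1 := by
  simp [P, List.length_flatten, List.map_replicate, List.sum_replicate]
  omega

lemma length_Q (n : Nat) : (Q n).length = 2*n + 1 := by
  simp [Q, List.length_flatten, List.map_replicate, List.sum_replicate]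
  omega

lemma repeat_plus (n : Nat) :
    PySem.List.pyRepeat ['+', '-'] ((n : Int) + 1) = P n ++ ['-'] := by
  induction n with
  | zero => rfl
  | succ n ih =>
      have h1 : ((n : Int) + 1 + 1).toNat = ((n : Int) + 1).toNat + 1 := by omega
      simp only [PySem.List.pyRepeat] at *
      push_cast
      rw [show ((n : Int) + 1 + 1) = ((n : Int) + 1) + 1 by ring] at *
      rw [h1, List.replicate_succ, List.flatten_cons, ih]
      simp [P, List.replicate_succ]

lemma repeat_bar (n : Nat) :
    PySem.List.pyRepeat ['|', '.'] ((n : Int) + 1) = Q n ++ ['.'] := by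
  induction n with
  | zero => rfl
  | succ n ih =>
      have h1 : ((n : Int) + 1 + 1).toNat = ((n : Int) + 1).toNat + 1 := by omega
      simp only [PySem.List.pyRepeat] at *
      push_cast
      rw [show ((n : Int) + 1 + 1) = ((n : Int) + 1) + 1 by ring] at *
      rw [h1, List.replicate_succ, List.flatten_cons, ih]
      simp [Q, List.replicate_succ]

lemma slice_plus (n : Nat) :
    PySem.List.slice (PySem.List.pyRepeat ['+', '-'] ((n : Int) + 1)) none (some (2*(n : Int) + 1)) = P n := by
  rw [repeat_plus, PySem.List.slice_to _ (by omega)]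
  have h : ((2*(n : Int) + 1)).toNat = (P n).length := by rw [length_P]; omega
  rw [h, List.take_left]

lemma slice_bar (n : Nat) :
    PySem.List.slice (PySem.List.pyRepeat ['|', '.'] ((n : Int) + 1)) none (some (2*(n : Int) + 1)) = Q n := by
  rw [repeat_bar, PySem.List.slice_to _ (by omega)]
  have h : ((2*(n : Int) + 1)).toNat = (Q n).length := by rw [length_Q]; omega
  rw [h, List.take_left]

lemma pat_plus (n : Nat) :
    (PySem.List.pyRange 0 (2*(n : Int) + 1) 1).map (fun j => if PySem.Int.mod j 2 = 0 then '+' else '-') = P n := by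
  induction n with
  | zero => rfl
  | succ n ih =>
      have e : (2*((n : Nat) + 1 : Nat) : Int) + 1 = ((2*(n : Int) + 1) + 1) + 1 := by push_cast; ring
      rw [e, PySem.List.pyRange_one_succ_right (show (0:Int) ≤ 2*(n : Int) + 1 + 1 by omega),
          PySem.List.pyRange_one_succ_right (show (0:Int) ≤ 2*(n : Int) + 1 by omega)]
      simp only [List.map_append, ih, List.map_cons, List.map_nil]
      have h1 : PySem.Int.mod (2*(n : Int) + 1) 2 = 1 := by rw [modtwo]; omega
      have h2 : PySem.Int.mod (2*(n : Int) + 1 + 1) 2 = 0 := by rw [modtwo]; omega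
      rw [h1, h2]
      simp [P, List.replicate_succ']

lemma pat_bar (n : Nat) :
    (PySem.List.pyRange 0 (2*(n : Int) + 1) 1).map (fun j => if PySem.Int.mod j 2 = 0 then '|' else '.') = Q n := by
  induction n with
  | zero => rfl
  | succ n ih =>
      have e : (2*((n : Nat) + 1 : Nat) : Int) + 1 = ((2*(n : Int) + 1) + 1) + 1 := by push_cast; ring
      rw [e, PySem.List.pyRange_one_succ_right (show (0:Int) ≤ 2*(n : Int) + 1 + 1 by omega),
          PySem.List.pyRange_one_succ_right (show (0:Int) ≤ 2*(n : Int) + 1 by omega)]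
      simp only [List.map_append, ih, List.map_cons, List.map_nil]
      have h1 : PySem.Int.mod (2*(n : Int) + 1) 2 = 1 := by rw [modtwo]; omega
      have h2 : PySem.Int.mod (2*(n : Int) + 1 + 1) 2 = 0 := by rw [modtwo]; omega
      rw [h1, h2]
      simp [Q, List.replicate_succ']

-- chCell for a row i ≥ 2 is the pure pattern cell
lemma chCell_ge_two_even (i : Int) (h2 : 2 ≤ i) (he : PySem.Int.mod i 2 = 0) (j : Int) :
    chCell i j = (if PySem.Int.mod j 2 = 0 then '+' else '-') := by
  unfold chCell
  rw [if_neg (by omega : ¬ (i < 2 ∧ j < 2)), if_pos he]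

lemma chCell_ge_two_odd (i : Int) (h2 : 2 ≤ i) (he : ¬ PySem.Int.mod i 2 = 0) (j : Int) :
    chCell i j = (if PySem.Int.mod j 2 = 0 then '|' else '.') := by
  unfold chCell
  rw [if_neg (by omega : ¬ (i < 2 ∧ j < 2)), if_neg he]

-- proof-side let-free view of sAltRow
def rowPat (c i : Int) : List Char :=
  if PySem.Int.mod i 2 = 0 then
    PySem.List.slice (PySem.List.pyRepeat ['+', '-'] (c + 1)) none (some (2*c + 1))
  else
    PySem.List.slice (PySem.List.pyRepeat ['|', '.'] (c + 1)) none (some (2*c + 1))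



-- core: A's row (as chars) equals B's row
lemma range_split (n : Nat) (hn : 1 ≤ n) :
    PySem.List.pyRange 0 (2*(n : Int) + 1) 1 = [0, 1] ++ PySem.List.pyRange 2 (2*(n : Int) + 1) 1 := by
  rw [PySem.List.pyRange_one_append 0 2 (2*(n : Int) + 1) (by omega) (by omega)]
  rfl

lemma drop_P (n : Nat) (hn : 1 ≤ n) :
    (P n).drop 2 = (PySem.List.pyRange 2 (2*(n : Int) + 1) 1).map
      (fun j => if PySem.Int.mod j 2 = 0 then '+' else '-') := by
  rw [← pat_plus n, range_split n hn]
  rfl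

lemma drop_Q (n : Nat) (hn : 1 ≤ n) :
    (Q n).drop 2 = (PySem.List.pyRange 2 (2*(n : Int) + 1) 1).map
      (fun j => if PySem.Int.mod j 2 = 0 then '|' else '.') := by
  rw [← pat_bar n, range_split n hn]
  rfl

lemma row_eq (c i : Int) (hi : 0 ≤ i) :
    (PySem.List.pyRange 0 (2*c + 1) 1).map (chCell i) = sAltRow c i := by
  rw [show sAltRow c i =
      (if i < 2 then
        List.replicate (min 2 (rowPat c i).length) '.' ++ PySem.List.slice (rowPat c i) (some 2) none
      else rowPat c i) from rfl]
  unfold rowPat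
  by_cases hc : c < 0
  · -- width 2c+1 ≤ 0: A's row is empty and so are both of B's patterns
    have hr : PySem.List.pyRange 0 (2*c + 1) 1 = [] := PySem.List.pyRange_one_eq_nil (by omega)
    have hp : PySem.List.pyRepeat ['+', '-'] (c + 1) = [] := by
      simp [PySem.List.pyRepeat, Int.toNat_of_nonpos (show c + 1 ≤ 0 by omega)]
    have hb : PySem.List.pyRepeat ['|', '.'] (c + 1) = [] := by
      simp [PySem.List.pyRepeat, Int.toNat_of_nonpos (show c + 1 ≤ 0 by omega)]
    rw [hr, hp, hb]
    simp [PySem.List.slice]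
  · push Not at hc
    obtain ⟨n, rfl⟩ : ∃ n : Nat, c = (n : Int) := ⟨c.toNat, (Int.toNat_of_nonneg hc).symm⟩
    rw [slice_plus n, slice_bar n]
    rcases (show i = 0 ∨ i = 1 ∨ 2 ≤ i by omega) with h0 | h1 | h2
    · subst h0
      rw [if_pos (show PySem.Int.mod 0 2 = 0 by rw [modtwo]; decide),
          if_pos (show (0 : Int) < 2 by omega),
          PySem.List.slice_from _ (show (0:Int) ≤ 2 by omega)]

      rcases Nat.eq_zero_or_pos n with h | h
      · subst h; decide
      · rw [range_split n h, length_P,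
            show min 2 (2*n + 1) = 2 by omega]
        simp only [List.map_append]
        rw [show ((2:Int).toNat) = 2 from rfl, drop_P n h]
        have h01 : ([0, 1] : List Int).map (chCell 0) = ['.', '.'] := by decide
        rw [h01]
        refine congrArg _ (List.map_congr_left ?_)
        intro j hj
        have hj2 : 2 ≤ j := (PySem.List.mem_pyRange_one.mp hj).1
        unfold chCell
        rw [if_neg (by omega : ¬ ((0:Int) < 2 ∧ j < 2)),
            if_pos (show PySem.Int.mod 0 2 = 0 by rw [modtwo]; decide)]
    · subst h1
      rw [if_neg (show ¬ PySem.Int.mod 1 2 = 0 by rw [modtwo]; decide),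
          if_pos (show (1 : Int) < 2 by omega),
          PySem.List.slice_from _ (show (0:Int) ≤ 2 by omega)]
      rcases Nat.eq_zero_or_pos n with h | h
      · subst h; decide
      · rw [range_split n h, length_Q,
            show min 2 (2*n + 1) = 2 by omega]
        simp only [List.map_append]
        rw [show ((2:Int).toNat) = 2 from rfl, drop_Q n h]
        have h01 : ([0, 1] : List Int).map (chCell 1) = ['.', '.'] := by decide
        rw [h01]
        refine congrArg _ (List.map_congr_left ?_)
        intro j hj
        have hj2 : 2 ≤ j := (PySem.List.mem_pyRange_one.mp hj).1
        unfold chCell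
        rw [if_neg (by omega : ¬ ((1:Int) < 2 ∧ j < 2)),
            if_neg (show ¬ PySem.Int.mod 1 2 = 0 by rw [modtwo]; decide)]
    · rw [if_neg (show ¬ i < 2 by omega)]
      by_cases hp : PySem.Int.mod i 2 = 0
      · rw [if_pos hp, ← pat_plus n]
        exact List.map_congr_left (fun j _ => chCell_ge_two_even i h2 hp j)
      · rw [if_neg hp, ← pat_bar n]
        exact List.map_congr_left (fun j _ => chCell_ge_two_odd i h2 hp j)

-- A's string row equals B's string row
lemma join_row (c i : Int) (hi : 0 ≤ i) :
    PySem.Str.join "" ((PySem.List.pyRange 0 (2*c + 1) 1).map (sCell i)) = String.ofList (sAltRow c i) := by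
  rw [PySem.Str.join]
  have h1 : (("" : String)).toList = [] := rfl
  rw [h1, List.map_map]
  have h2 : (String.toList ∘ sCell i) = fun j => [chCell i j] := by
    funext j; simp [sCell_toList]
  rw [h2, show (fun (j : Int) => [chCell i j]) = (fun (ch : Char) => [ch]) ∘ chCell i from rfl,
     ← List.map_map, PySem.Chars.join_nil_singletons, row_eq c i hi]

lemma sA_map (r c : Int) :
    s r c = (PySem.List.pyRange 0 (2*r + 1) 1).map
      (fun i => PySem.Str.join "" ((PySem.List.pyRange 0 (2*c + 1) 1).map (sCell i))) := by
  unfold s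
  have hinner : ∀ i : Int,
      (PySem.List.pyRange 0 (2*c + 1) 1).foldl
        (fun line j =>
          if i < 2 ∧ j < 2 then line ++ ["."]
          else if PySem.Int.mod i 2 = 0 then
            (if PySem.Int.mod j 2 = 0 then line ++ ["+"] else line ++ ["-"])
          else
            (if PySem.Int.mod j 2 = 0 then line ++ ["|"] else line ++ ["."])) []
      = (PySem.List.pyRange 0 (2*c + 1) 1).map (sCell i) := by
    intro i
    have hb : (fun (line : List String) (j : Int) =>
        if i < 2 ∧ j < 2 then line ++ ["."]
        else if PySem.Int.mod i 2 = 0 then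
          (if PySem.Int.mod j 2 = 0 then line ++ ["+"] else line ++ ["-"])
        else
          (if PySem.Int.mod j 2 = 0 then line ++ ["|"] else line ++ ["."]))
        = fun line j => line ++ [sCell i j] := by
      funext line j; simp only [sCell]; split_ifs <;> rfl
    rw [hb, foldl_app]; simp
  simp only [hinner]
  rw [foldl_app]; simp

-- ===== VERDICT (by name: the statement is the Claim_ definition above) =====
theorem s_spec : Claim_equal_s := by
  intro r c _
  unfold Spec_s s_alt
  rw [sA_map]
  refine List.map_congr_left ?_
  intro i hi
  exact join_row c i (PySem.List.mem_pyRange_one.mp hi).1
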